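-- pv_equiv track=rewrite | github.com/cziczer/Matrix-Algorithms | Lab 3_coo_to_csr_transform/main.py | create_rowptr
-- ===== SOURCE A (Python) =====
-- def create_rowptr(rows):
--     result = []
--     current_row = 0
--     for i, x in enumerate(rows):
--         if x > current_row:
--             current_row = x
--             result.append(i+1)
--     result.append(len(rows)+1)
--
--     return result
-- ===== SOURCE B (Python) =====
-- def create_rowptr(rows):
--     # Two-pass: build the prefix running-max table, then select jump positions.
--     prefmax = [0]
--     for x in rows:
--         prefmax.append(max(prefmax[-1], x))
--     result = [i + 1 for i, (x, m) in enumerate(zip(rows, prefmax)) if x > m]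
--     result.append(len(rows) + 1)
--     return result
-- ===== Notes on version B (the rewrite author's own statement) =====
-- stated objective: alternative
-- what changed: Replaces A's single stateful scan (mutable current_row updated inside the loop) with a two-pass decomposition: first build a prefix running-max table, then a stateless comprehension selects positions where the row index exceeds the prior maximum.
import Mathlib
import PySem

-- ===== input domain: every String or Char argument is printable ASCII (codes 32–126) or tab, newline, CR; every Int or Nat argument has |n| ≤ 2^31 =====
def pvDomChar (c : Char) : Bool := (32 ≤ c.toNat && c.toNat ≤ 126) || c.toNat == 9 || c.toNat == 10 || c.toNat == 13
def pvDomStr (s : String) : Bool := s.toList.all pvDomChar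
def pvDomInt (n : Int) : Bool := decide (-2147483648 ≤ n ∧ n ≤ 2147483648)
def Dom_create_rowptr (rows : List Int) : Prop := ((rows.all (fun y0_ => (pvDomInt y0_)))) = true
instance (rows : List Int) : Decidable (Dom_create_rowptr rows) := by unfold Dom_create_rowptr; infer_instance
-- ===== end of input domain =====

-- B replaces A's single stateful scan by a two-pass build: prefix running-max table, then a stateless selection of the jump positions (objective: alternative).


-- ===== PORT A =====
def create_rowptr (rows : List Int) : List Int :=
  let st := (PySem.List.enumerate rows 0).foldl
    (fun (acc : List Int × Int) p => if p.2 > acc.2 then (acc.1 ++ [p.1 + 1], p.2) else acc)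
    ([], 0)
  st.1 ++ [(rows.length : Int) + 1]

-- ===== PORT B =====
def create_rowptr_alt (rows : List Int) : List Int :=
  let prefmax := rows.foldl (fun (acc : List Int) x => acc ++ [max (acc.getLastD 0) x]) [0]
  ((PySem.List.enumerate (rows.zip prefmax) 0).filterMap
    (fun p => if p.2.1 > p.2.2 then some (p.1 + 1) else none))
  ++ [(rows.length : Int) + 1]

-- ===== PRECONDITION & SPEC =====
def Spec_create_rowptr (rows : List Int) (out : List Int) : Prop := out = create_rowptr_alt rows
instance (rows : List Int) (out : List Int) : Decidable (Spec_create_rowptr rows out) := by unfold Spec_create_rowptr; infer_instance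

-- ===== CLAIM (what is proved, stated in full; the proofs are below) =====
def Claim_equal_create_rowptr : Prop := ∀ (rows : List Int), Dom_create_rowptr rows → Spec_create_rowptr rows (create_rowptr rows)

-- ===== LEMMAS AND PROOFS =====

-- the selected positions, with running maximum cur and next index k
def pvSel (k cur : Int) : List Int → List Int
  | [] => []
  | x :: xs => (if x > cur then [k + 1] else []) ++ pvSel (k + 1) (max cur x) xs

-- the prefix running-max table starting from cur
def pvPm (cur : Int) : List Int → List Int
  | [] => [cur]
  | x :: xs => cur :: pvPm (max cur x) xs

theorem pvA_fold (xs : List Int) : ∀ (k cur : Int) (res : List Int),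
    ((PySem.List.enumerate xs k).foldl
      (fun (acc : List Int × Int) p => if p.2 > acc.2 then (acc.1 ++ [p.1 + 1], p.2) else acc)
      (res, cur)).1 = res ++ pvSel k cur xs := by
  induction xs with
  | nil => intro k cur res; simp [PySem.List.enumerate_nil, pvSel]
  | cons x xs ih =>
    intro k cur res
    rw [PySem.List.enumerate_cons]
    by_cases h : x > cur
    · simp [pvSel, h, List.foldl_cons, ih, max_eq_right (le_of_lt h)]
    · simp [pvSel, h, List.foldl_cons, ih, max_eq_left (by omega : x ≤ cur)]

theorem pvB_pm (xs : List Int) : ∀ (cur : Int) (res : List Int),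
    xs.foldl (fun (acc : List Int) x => acc ++ [max (acc.getLastD 0) x]) (res ++ [cur])
      = res ++ pvPm cur xs := by
  induction xs with
  | nil => intro cur res; simp [pvPm]
  | cons x xs ih =>
    intro cur res
    have h1 : (res ++ [cur]).getLastD 0 = cur := by simp
    rw [List.foldl_cons, h1]
    have h2 : res ++ [cur] ++ [max cur x] = (res ++ [cur]) ++ [max cur x] := rfl
    rw [h2, ih (max cur x) (res ++ [cur])]
    simp [pvPm]

theorem pvB_sel (xs : List Int) : ∀ (cur k : Int),
    (PySem.List.enumerate (xs.zip (pvPm cur xs)) k).filterMap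
      (fun p => if p.2.1 > p.2.2 then some (p.1 + 1) else none)
      = pvSel k cur xs := by
  induction xs with
  | nil => intro cur k; simp [pvPm, pvSel, PySem.List.enumerate_nil]
  | cons x xs ih =>
    intro cur k
    rw [pvPm, List.zip_cons_cons, PySem.List.enumerate_cons, List.filterMap_cons]
    by_cases h : x > cur
    · simp [pvSel, h, ih]
    · simp [pvSel, h, ih]

-- ===== VERDICT (by name: the statement is the Claim_ definition above) =====
theorem create_rowptr_spec : Claim_equal_create_rowptr := by
  intro rows _
  show create_rowptr rows = create_rowptr_alt rows
  have hpm : rows.foldl (fun (acc : List Int) x => acc ++ [max (acc.getLastD 0) x]) [0]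
      = pvPm 0 rows := by
    have := pvB_pm rows 0 []
    simpa using this
  simp only [create_rowptr, create_rowptr_alt, pvA_fold, hpm, pvB_sel]
  simp
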